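-- pv_equiv track=rewrite | github.com/margueritepap/projet_eivp_info | projet_prog.py | liste_rang
-- ===== SOURCE A (Python) =====
-- def tri_rapide(L):
--     if L==[]:
--         return L
--     L_g=[]
--     L_d=[]
--     for i in range(1,len(L)):
--         if L[i]<=L[0]:
--             L_g.append(L[i])
--         else:
--             L_d.append(L[i])
--     return tri_rapide(L_g)+[L[0]]+tri_rapide(L_d)
--
-- def rang(a,L): #donne le rang de la première apparaition l'élément a dans la liste L
--     T=tri_rapide(L)
--     for k in range (len(L)):
--         if a==L[k]:
--             return k+1
--     return "Cet élément n'est pas dans la liste"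
--
-- def liste_rang(L): #renvoie la liste des rangs des éléments de L
--     T=tri_rapide(L)
--     r=0
--     l=len(L)
--     LR=[]
--     for k in range (l):
--         LR+=[rang(L[k],T)]
--     return LR
-- ===== SOURCE B (Python) =====
-- def liste_rang(L):
--     # sort once, record the 1-based first sorted position of each distinct value,
--     # then answer every query by one dict lookup
--     T = sorted(L)
--     first = {}
--     for i, x in enumerate(T):
--         if x not in first:
--             first[x] = i + 1
--     return [first[x] for x in L]
-- ===== Notes on version B (the rewrite author's own statement) =====
-- stated objective: faster
-- what changed: replaces the per-element linear scan of the quicksorted list (and the redundant re-sort inside rang) with one sort plus a value-to-first-position dict built in a single pass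
import Mathlib
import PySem

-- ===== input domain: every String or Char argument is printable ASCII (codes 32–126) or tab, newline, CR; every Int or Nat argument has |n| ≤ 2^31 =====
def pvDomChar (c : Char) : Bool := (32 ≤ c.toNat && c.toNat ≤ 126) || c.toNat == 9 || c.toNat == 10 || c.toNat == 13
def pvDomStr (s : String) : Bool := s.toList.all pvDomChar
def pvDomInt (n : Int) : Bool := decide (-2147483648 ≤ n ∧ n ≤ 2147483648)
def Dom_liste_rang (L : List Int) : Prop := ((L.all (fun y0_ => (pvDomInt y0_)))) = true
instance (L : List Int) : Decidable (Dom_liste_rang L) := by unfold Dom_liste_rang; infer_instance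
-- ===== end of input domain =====

-- B replaces A's per-element linear scan of the quicksorted list by one sort plus a
-- value→first-position dict; return values agree on every input (A never raises).

-- ===== PORT A =====
-- quicksort: the append loops over range(1, len(L)) build exactly the two in-order filters
def tri_rapide (L : List Int) : List Int :=
  match L with
  | [] => []
  | p :: rest =>
    tri_rapide (rest.filter (fun x => decide (x ≤ p))) ++ [p] ++
      tri_rapide (rest.filter (fun x => !decide (x ≤ p)))
termination_by L.length
decreasing_by
  all_goals
    simp only [List.length_unattach]
    exact Nat.lt_succ_of_le (le_trans (List.length_filter_le _ _) (by simp))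

-- the 'for k in range(len(L)): if a == L[k]: return k+1' loop, walking the list with its index
def rangLoop (a : Int) (T : List Int) (k : Int) : Option Int :=
  match T with
  | [] => none            -- Python would return the not-found string here; unreachable from liste_rang
  | t :: ts => if a = t then some (k + 1) else rangLoop a ts (k + 1)

def rang (a : Int) (L : List Int) : Option Int :=
  let _T := tri_rapide L  -- computed and discarded, exactly as in the Python
  rangLoop a L 0

def liste_rang (L : List Int) : List Int :=
  let T := tri_rapide L
  (PySem.List.pyRange 0 (PySem.List.len L) 1).foldl
    (fun LR k => LR ++ [(rang (PySem.List.pyGetD L k 0) T).getD 0]) []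
    -- .getD 0 is unreachable: rang is always called on an element of T

-- ===== PORT B =====
def liste_rang_alt (L : List Int) : List Int :=
  let T := PySem.List.sorted L (fun x => x) false
  let first := (PySem.List.enumerate T 0).foldl
    (fun d (p : Int × Int) => if d.contains p.2 then d else d.insert p.2 (p.1 + 1))
    PySem.Dict.empty
  L.map (fun x => (first.get? x).getD 0)  -- KeyError impossible: every x ∈ L occurs in T

-- ===== PRECONDITION & SPEC =====
def Spec_liste_rang (L : List Int) (out : List Int) : Prop := out = liste_rang_alt L
instance (L : List Int) (out : List Int) : Decidable (Spec_liste_rang L out) := by unfold Spec_liste_rang; infer_instance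

-- ===== CLAIM (what is proved, stated in full; the proofs are below) =====
def Claim_equal_liste_rang : Prop := ∀ (L : List Int), Dom_liste_rang L → Spec_liste_rang L (liste_rang L)

-- ===== LEMMAS AND PROOFS =====

lemma tri_rapide_perm : ∀ (L : List Int), (tri_rapide L).Perm L
  | [] => by rw [tri_rapide]
  | p :: rest => by
    rw [tri_rapide]
    have h1 := tri_rapide_perm (rest.filter (fun x => decide (x ≤ p)))
    have h2 := tri_rapide_perm (rest.filter (fun x => !decide (x ≤ p)))
    refine ((h1.append_right _).append h2).trans ?_
    have heq : (rest.filter (fun x => decide (x ≤ p))) ++ [p] ++ (rest.filter (fun x => !decide (x ≤ p)))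
        = (rest.filter (fun x => decide (x ≤ p))) ++ p :: (rest.filter (fun x => !decide (x ≤ p))) := by simp
    rw [heq]
    exact List.perm_middle.trans ((List.filter_append_perm (fun x => decide (x ≤ p)) rest).cons p)
termination_by L => L.length
decreasing_by
  · exact Nat.lt_succ_of_le (List.length_filter_le _ _)
  · exact Nat.lt_succ_of_le (List.length_filter_le _ _)

lemma tri_rapide_pairwise : ∀ (L : List Int), (tri_rapide L).Pairwise (· ≤ ·)
  | [] => by rw [tri_rapide]; simp
  | p :: rest => by
    rw [tri_rapide]
    have ih1 := tri_rapide_pairwise (rest.filter (fun x => decide (x ≤ p)))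
    have ih2 := tri_rapide_pairwise (rest.filter (fun x => !decide (x ≤ p)))
    have hmem1 : ∀ x ∈ tri_rapide (rest.filter (fun x => decide (x ≤ p))), x ≤ p := by
      intro x hx
      have := (tri_rapide_perm _).mem_iff.mp hx
      simpa using (List.of_mem_filter this)
    have hmem2 : ∀ x ∈ tri_rapide (rest.filter (fun x => !decide (x ≤ p))), p ≤ x := by
      intro x hx
      have := (tri_rapide_perm _).mem_iff.mp hx
      have := List.of_mem_filter this
      simp at this; omega
    rw [List.pairwise_append]
    refine ⟨?_, ih2, ?_⟩
    · rw [List.pairwise_append]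
      refine ⟨ih1, by simp, ?_⟩
      intro x hx y hy
      simp at hy; subst hy
      exact hmem1 x hx
    · intro x hx y hy
      have hy' := hmem2 y hy
      rcases List.mem_append.mp hx with hx | hx
      · exact le_trans (hmem1 x hx) hy'
      · simp at hx; subst hx; exact hy'
termination_by L => L.length
decreasing_by
  · exact Nat.lt_succ_of_le (List.length_filter_le _ _)
  · exact Nat.lt_succ_of_le (List.length_filter_le _ _)

lemma tri_rapide_eq_sorted (L : List Int) :
    tri_rapide L = PySem.List.sorted L (fun x => x) false := by
  rw [PySem.List.sorted_id_eq_of_perm_of_pairwise L (tri_rapide L)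
        (tri_rapide_perm L) (tri_rapide_pairwise L)]

-- the first-occurrence dict looked up at x answers exactly A's indexed scan
lemma dict_fold_get? (T : List Int) (k : Int) (d : PySem.Dict Int Int) (x : Int) :
    (((PySem.List.enumerate T k).foldl
        (fun d (p : Int × Int) => if d.contains p.2 then d else d.insert p.2 (p.1 + 1)) d).get? x)
      = if d.contains x then d.get? x else rangLoop x T k := by
  induction T generalizing k d with
  | nil =>
    simp only [PySem.List.enumerate_nil, List.foldl_nil, rangLoop]
    split
    · rfl
    · rename_i h
      exact (PySem.Dict.get?_eq_none_iff_contains d x).mpr (by simpa using h)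
  | cons t ts ih =>
    rw [PySem.List.enumerate_cons, List.foldl_cons]
    simp only [rangLoop]
    by_cases hct : d.contains t = true
    · rw [if_pos hct, ih]
      by_cases hxt : x = t
      · subst hxt; simp [hct]
      · simp [hxt]
    · rw [if_neg hct, ih]
      rw [PySem.Dict.contains_insert, PySem.Dict.get?_insert]
      by_cases hxt : x = t
      · subst hxt; simp [hct]
      · simp [hxt]

lemma rang_unfold (a : Int) (L : List Int) : rang a L = rangLoop a L 0 := rfl

-- ===== VERDICT (by name: the statement is the Claim_ definition above) =====
theorem liste_rang_spec : Claim_equal_liste_rang := by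
  intro L _hdom
  unfold Spec_liste_rang liste_rang liste_rang_alt
  simp only [PySem.List.len_eq]
  rw [PySem.List.foldl_pyRange_zero_pyGetD' L 0
        (fun LR x => LR ++ [(rang x (tri_rapide L)).getD 0]) []]
  rw [PySem.List.foldl_append_singleton_eq_map]
  apply List.map_congr_left
  intro x _hx
  rw [rang_unfold, tri_rapide_eq_sorted, dict_fold_get?]
  simp [PySem.Dict.contains_empty]
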